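-- pv_equiv track=rewrite | github.com/3ntropia/pythonDojo | matrix/m2/m2.py | fifth_matrix
-- ===== SOURCE A (Python) =====
-- def fifth_matrix(size):
--     m = []
--     num = 1
--     for i in range(size):
--         row = []
--         if i % 2 == 0:
--             for j in range(size):
--                 if j % 2 != 0:
--                     row.append(num)
--                     num += 1
--                 else:
--                     row.append(0)
--         else:
--             for j in range(size):
--                 if j % 2 == 0:
--                     row.append(num)
--                     num += 1
--                 else:
--                     row.append(0)
--         m.append(row)
--     return m
-- ===== SOURCE B (Python) =====
-- def fifth_matrix(size):
--     a = (size + 1) // 2  # filled cells in an odd row (even columns)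
--     b = size // 2        # filled cells in an even row (odd columns)
--     return [
--         [
--             0 if (i + j) % 2 == 0
--             else ((i + 1) // 2) * b + (i // 2) * a
--                  + (j // 2 if i % 2 == 0 else (j + 1) // 2) + 1
--             for j in range(size)
--         ]
--         for i in range(size)
--     ]
-- ===== Notes on version B (the rewrite author's own statement) =====
-- stated objective: alternative
-- what changed: B computes each cell positionally by a closed-form index formula (prefix of filled cells before (i,j) in row-major order) in a nested comprehension, eliminating A's running counter and stateful row building.
import Mathlib
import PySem

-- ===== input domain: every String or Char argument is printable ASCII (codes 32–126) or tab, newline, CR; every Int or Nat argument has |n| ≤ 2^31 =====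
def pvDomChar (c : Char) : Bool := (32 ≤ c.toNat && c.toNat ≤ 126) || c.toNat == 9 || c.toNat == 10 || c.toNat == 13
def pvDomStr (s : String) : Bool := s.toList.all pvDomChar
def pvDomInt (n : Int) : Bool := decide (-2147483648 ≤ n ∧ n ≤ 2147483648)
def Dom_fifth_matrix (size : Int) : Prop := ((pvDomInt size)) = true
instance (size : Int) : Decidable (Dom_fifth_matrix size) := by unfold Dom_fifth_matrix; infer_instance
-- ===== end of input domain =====

-- B replaces A's running counter by a closed-form positional value for each cell (alternative decomposition, same cost).

-- ===== PORT A =====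
-- inner loop body for even rows: 'if j % 2 != 0: row.append(num); num += 1 else: row.append(0)'
def pvStepE (rs : List Int × Int) (j : Int) : List Int × Int :=
  if PySem.Int.mod j 2 ≠ 0 then (rs.1 ++ [rs.2], rs.2 + 1) else (rs.1 ++ [0], rs.2)

-- inner loop body for odd rows: 'if j % 2 == 0: row.append(num); num += 1 else: row.append(0)'
def pvStepO (rs : List Int × Int) (j : Int) : List Int × Int :=
  if PySem.Int.mod j 2 = 0 then (rs.1 ++ [rs.2], rs.2 + 1) else (rs.1 ++ [0], rs.2)

-- one iteration of the outer 'for i in range(size)' loop; state = (m, num)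
def pvOuter (size : Int) (st : List (List Int) × Int) (i : Int) : List (List Int) × Int :=
  if PySem.Int.mod i 2 = 0 then
    let r := (PySem.List.pyRange 0 size 1).foldl pvStepE ([], st.2)
    (st.1 ++ [r.1], r.2)
  else
    let r := (PySem.List.pyRange 0 size 1).foldl pvStepO ([], st.2)
    (st.1 ++ [r.1], r.2)

def fifth_matrix (size : Int) : List (List Int) :=
  ((PySem.List.pyRange 0 size 1).foldl (pvOuter size) ([], 1)).1

-- ===== PORT B =====
def fifth_matrix_alt (size : Int) : List (List Int) :=
  let a := PySem.Int.floordiv (size + 1) 2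
  let b := PySem.Int.floordiv size 2
  (PySem.List.pyRange 0 size 1).map (fun i =>
    (PySem.List.pyRange 0 size 1).map (fun j =>
      if PySem.Int.mod (i + j) 2 = 0 then 0
      else PySem.Int.floordiv (i + 1) 2 * b + PySem.Int.floordiv i 2 * a +
           (if PySem.Int.mod i 2 = 0 then PySem.Int.floordiv j 2
            else PySem.Int.floordiv (j + 1) 2) + 1))

-- ===== PRECONDITION & SPEC =====
def Spec_fifth_matrix (size : Int) (out : List (List Int)) : Prop := out = fifth_matrix_alt size
instance (size : Int) (out : List (List Int)) : Decidable (Spec_fifth_matrix size out) := by unfold Spec_fifth_matrix; infer_instance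

-- ===== CLAIM (what is proved, stated in full; the proofs are below) =====
def Claim_equal_fifth_matrix : Prop := ∀ (size : Int), Dom_fifth_matrix size → Spec_fifth_matrix size (fifth_matrix size)

-- ===== LEMMAS AND PROOFS =====

-- B's cell value, with `//` and `%` written as Int ediv/emod (equal for the positive divisor 2)
def pvBcell (size i j : Int) : Int :=
  if (i + j) % 2 = 0 then 0
  else (i + 1) / 2 * (size / 2) + i / 2 * ((size + 1) / 2) +
       (if i % 2 = 0 then j / 2 else (j + 1) / 2) + 1

-- number of filled cells in rows 0..i-1 (row-major prefix), plus the initial counter 1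
def pvNum (size i : Int) : Int := 1 + (i + 1) / 2 * (size / 2) + i / 2 * ((size + 1) / 2)

lemma pvAlt_eq_map (size : Int) :
    fifth_matrix_alt size =
      (PySem.List.pyRange 0 size 1).map (fun i => (PySem.List.pyRange 0 size 1).map (pvBcell size i)) := by
  unfold fifth_matrix_alt pvBcell
  simp only [PySem.Int.mod_eq_emod_of_pos (by norm_num : (0:Int) < 2),
             PySem.Int.floordiv_eq_ediv_of_pos (by norm_num : (0:Int) < 2)]

lemma pvInnerE_spec (num : Int) (n : Nat) :
    (PySem.List.pyRange 0 (n : Int) 1).foldl pvStepE ([], num)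
      = ((PySem.List.pyRange 0 (n : Int) 1).map
          (fun j => if j % 2 = 0 then 0 else num + j / 2), num + (n : Int) / 2) := by
  induction n with
  | zero => simp [PySem.List.pyRange_one_eq_nil]
  | succ n ih =>
      have h : ((n + 1 : Nat) : Int) = (n : Int) + 1 := by push_cast; ring
      rw [h, PySem.List.pyRange_one_succ_right (Int.natCast_nonneg n)]
      rw [List.foldl_append, List.map_append, ih]
      simp only [List.foldl_cons, List.foldl_nil, pvStepE,
        PySem.Int.mod_eq_emod_of_pos (by norm_num : (0:Int) < 2), List.map_cons, List.map_nil]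
      rcases Int.emod_two_eq_zero_or_one (n : Int) with h1 | h1
      · simp [h1, Prod.ext_iff]
        all_goals omega
      · simp [h1, Prod.ext_iff]
        all_goals omega

lemma pvInnerO_spec (num : Int) (n : Nat) :
    (PySem.List.pyRange 0 (n : Int) 1).foldl pvStepO ([], num)
      = ((PySem.List.pyRange 0 (n : Int) 1).map
          (fun j => if j % 2 = 0 then num + (j + 1) / 2 else 0), num + ((n : Int) + 1) / 2) := by
  induction n with
  | zero => simp [PySem.List.pyRange_one_eq_nil]
  | succ n ih =>
      have h : ((n + 1 : Nat) : Int) = (n : Int) + 1 := by push_cast; ring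
      rw [h, PySem.List.pyRange_one_succ_right (Int.natCast_nonneg n)]
      rw [List.foldl_append, List.map_append, ih]
      simp only [List.foldl_cons, List.foldl_nil, pvStepO,
        PySem.Int.mod_eq_emod_of_pos (by norm_num : (0:Int) < 2), List.map_cons, List.map_nil]
      rcases Int.emod_two_eq_zero_or_one (n : Int) with h1 | h1
      · simp [h1, Prod.ext_iff]
        all_goals omega
      · simp [h1, Prod.ext_iff]
        all_goals omega

-- an even row built by A's inner loop from counter pvNum is exactly B's row
lemma pvRowE (size : Int) (i : Int) (hi : i % 2 = 0) :
    ((PySem.List.pyRange 0 size 1).map (fun j => if j % 2 = 0 then 0 else pvNum size i + j / 2))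
      = (PySem.List.pyRange 0 size 1).map (pvBcell size i) := by
  apply List.map_congr_left
  intro j _
  unfold pvNum pvBcell
  have hpar : (i + j) % 2 = 0 ↔ j % 2 = 0 := by omega
  simp only [hpar, hi]
  split_ifs <;> ring

-- an odd row built by A's inner loop from counter pvNum is exactly B's row
lemma pvRowO (size : Int) (i : Int) (hi : i % 2 = 1) :
    ((PySem.List.pyRange 0 size 1).map (fun j => if j % 2 = 0 then pvNum size i + (j + 1) / 2 else 0))
      = (PySem.List.pyRange 0 size 1).map (pvBcell size i) := by
  apply List.map_congr_left
  intro j _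
  unfold pvNum pvBcell
  have hpar : (i + j) % 2 = 0 ↔ ¬ j % 2 = 0 := by omega
  have hi0 : ¬ i % 2 = 0 := by omega
  simp [hpar, hi0]
  split_ifs <;> (first | (exfalso; omega) | ring)

lemma pvOuter_spec (size : Int) (n : Nat) (hn : (n : Int) ≤ size) :
    (PySem.List.pyRange 0 (n : Int) 1).foldl (pvOuter size) ([], 1)
      = ((PySem.List.pyRange 0 (n : Int) 1).map
          (fun i => (PySem.List.pyRange 0 size 1).map (pvBcell size i)), pvNum size (n : Int)) := by
  induction n with
  | zero => simp [PySem.List.pyRange_one_eq_nil, pvNum]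
  | succ n ih =>
      have hle : (n : Int) ≤ size := by push_cast at hn ⊢; omega
      have h : ((n + 1 : Nat) : Int) = (n : Int) + 1 := by push_cast; ring
      rw [h, PySem.List.pyRange_one_succ_right (Int.natCast_nonneg n)]
      rw [List.foldl_append, List.map_append, ih hle]
      simp only [List.foldl_cons, List.foldl_nil, List.map_cons, List.map_nil, pvOuter]
      have hsz : size = ((size.toNat : Nat) : Int) := by omega
      rcases Int.emod_two_eq_zero_or_one (n : Int) with h1 | h1
      · have hm : PySem.Int.mod (n : Int) 2 = 0 := by
          rw [PySem.Int.mod_eq_emod_of_pos (by norm_num : (0:Int) < 2)]; exact h1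
        rw [if_pos hm, hsz, pvInnerE_spec, ← hsz]
        simp only [Prod.mk.injEq]
        refine ⟨by rw [pvRowE size (n : Int) h1], ?_⟩
        unfold pvNum
        have e1 : ((n : Int) + 1 + 1) / 2 = (n : Int) / 2 + 1 := by omega
        have e2 : ((n : Int) + 1) / 2 = (n : Int) / 2 := by omega
        rw [e1, e2]; ring
      · have hm : ¬ PySem.Int.mod (n : Int) 2 = 0 := by
          rw [PySem.Int.mod_eq_emod_of_pos (by norm_num : (0:Int) < 2)]; omega
        rw [if_neg hm, hsz, pvInnerO_spec, ← hsz]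
        simp only [Prod.mk.injEq]
        refine ⟨by rw [pvRowO size (n : Int) h1], ?_⟩
        unfold pvNum
        have e1 : ((n : Int) + 1 + 1) / 2 = ((n : Int) + 1) / 2 := by omega
        have e2 : ((n : Int) + 1) / 2 = (n : Int) / 2 + 1 := by omega
        rw [e1, e2]; ring

-- ===== VERDICT (by name: the statement is the Claim_ definition above) =====
theorem fifth_matrix_spec : Claim_equal_fifth_matrix := by
  intro size _
  unfold Spec_fifth_matrix
  rw [pvAlt_eq_map]
  unfold fifth_matrix
  rcases le_or_gt size 0 with hle | hpos
  · rw [PySem.List.pyRange_one_eq_nil hle]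
    simp
  · have hsz : size = ((size.toNat : Nat) : Int) := by omega
    have h2 := pvOuter_spec size size.toNat (by omega)
    rw [← hsz] at h2
    rw [h2]
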